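-- pv_equiv track=rewrite | github.com/IgorBelov10/otus_homeworks | homework1/poker_jokers.py | replace_jokers
-- ===== SOURCE A (Python) =====
-- import itertools
--
-- def replace_jokers(splited_hand):
--     """Подменяет джокеров на все возможные карты, котоыре они могут заменить"""
--     suits_red = ["D", "H"]
--     suits_black = ["C", "S"]
--     ranks = ["2", "3", "4", "5", "6", "7", "8", "9", "T", "J", "Q", "K", "A"]
--
--     hand = " ".join(splited_hand)
--
--     if "?R" in hand and "?B" in hand:
--         result = list(
--             hand.replace("?R", i) for i in (list(str(j[1] + j[0]) for j in itertools.product(suits_red, ranks))))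
--         return(list(k.replace("?B", i).split() for k in result for i in
--                list(str(j[1] + j[0]) for j in itertools.product(suits_black, ranks))))
--     if "?R" in hand:
--         return list(
--             hand.replace("?R", i).split() for i in (list(str(j[1]+j[0]) for j in itertools.product(suits_red, ranks))))
--     elif "?B" in hand:
--         return list(
--             hand.replace("?B", i).split() for i in (list(str(j[1]+j[0]) for j in itertools.product(suits_black, ranks)))
--         )
--     else:
--         return [hand.split()]
-- ===== SOURCE B (Python) =====
-- def replace_jokers(splited_hand):
--     """Подменяет джокеров на все возможные карты, котоыре они могут заменить"""
--     ranks = ["2", "3", "4", "5", "6", "7", "8", "9", "T", "J", "Q", "K", "A"]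
--     hand = " ".join(splited_hand)
--     present = [(j, suits) for j, suits in [("?R", ["D", "H"]), ("?B", ["C", "S"])]
--                if j in hand]
--
--     def expand(h, remaining):
--         if not remaining:
--             return [h.split()]
--         (joker, suits), rest = remaining[0], remaining[1:]
--         out = []
--         for s in suits:
--             for r in ranks:
--                 out.extend(expand(h.replace(joker, r + s), rest))
--         return out
--
--     return expand(hand, present)
-- ===== Notes on version B (the rewrite author's own statement) =====
-- stated objective: simpler
-- what changed: Replaces A's four hard-coded branches (with a duplicated itertools.product card-list comprehension in the two-joker case) by a recursive depth-first expansion: collect the jokers present, then a small recursive function substitutes one joker per level and recurses on the rest, the no-joker base case returning [hand.split()].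
import Mathlib
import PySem

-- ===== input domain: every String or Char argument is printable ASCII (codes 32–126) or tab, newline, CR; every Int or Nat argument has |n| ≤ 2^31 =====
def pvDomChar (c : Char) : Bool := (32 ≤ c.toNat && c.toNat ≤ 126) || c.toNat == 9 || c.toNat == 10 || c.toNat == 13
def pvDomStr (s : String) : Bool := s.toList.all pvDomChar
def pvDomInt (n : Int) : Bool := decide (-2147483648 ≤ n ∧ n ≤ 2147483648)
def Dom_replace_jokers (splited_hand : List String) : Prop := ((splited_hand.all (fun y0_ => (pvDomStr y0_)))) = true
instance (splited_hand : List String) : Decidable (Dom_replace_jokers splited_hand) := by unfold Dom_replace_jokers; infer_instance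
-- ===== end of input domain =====

-- B replaces A's four hard-coded branches (with a duplicated card-list comprehension) by a
-- recursive depth-first expansion over the list of jokers actually present; objective: simpler.

-- ===== PORT A =====
-- literal port of A; itertools.product(suits, ranks) is the nested flatMap/map below,
-- str(j[1] + j[0]) is PySem.Str.join "" [j.2, j.1]
def replace_jokers (splited_hand : List String) : List (List String) :=
  let suits_red : List String := ["D", "H"]
  let suits_black : List String := ["C", "S"]
  let ranks : List String := ["2", "3", "4", "5", "6", "7", "8", "9", "T", "J", "Q", "K", "A"]
  let hand := PySem.Str.join " " splited_hand
  if PySem.Str.isIn "?R" hand && PySem.Str.isIn "?B" hand then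
    let result := ((suits_red.flatMap (fun s => ranks.map (fun r => (s, r)))).map
        (fun j => PySem.Str.join "" [j.2, j.1])).map
      (fun i => PySem.Str.replace hand "?R" i)
    result.flatMap (fun k =>
      ((suits_black.flatMap (fun s => ranks.map (fun r => (s, r)))).map
          (fun j => PySem.Str.join "" [j.2, j.1])).map
        (fun i => PySem.Str.split₀ (PySem.Str.replace k "?B" i)))
  else if PySem.Str.isIn "?R" hand then
    ((suits_red.flatMap (fun s => ranks.map (fun r => (s, r)))).map
        (fun j => PySem.Str.join "" [j.2, j.1])).map
      (fun i => PySem.Str.split₀ (PySem.Str.replace hand "?R" i))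
  else if PySem.Str.isIn "?B" hand then
    ((suits_black.flatMap (fun s => ranks.map (fun r => (s, r)))).map
        (fun j => PySem.Str.join "" [j.2, j.1])).map
      (fun i => PySem.Str.split₀ (PySem.Str.replace hand "?B" i))
  else
    [PySem.Str.split₀ hand]

-- ===== PORT B =====
-- the inner recursive function `expand` of Source B; structural recursion on `remaining`
def pvExpand (ranks : List String) (h : String)
    (remaining : List (String × List String)) : List (List String) :=
  match remaining with
  | [] => [PySem.Str.split₀ h]
  | (joker, suits) :: rest =>
    suits.flatMap (fun s => ranks.flatMap (fun r =>
      pvExpand ranks (PySem.Str.replace h joker (PySem.Str.join "" [r, s])) rest))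

def replace_jokers_alt (splited_hand : List String) : List (List String) :=
  let ranks : List String := ["2", "3", "4", "5", "6", "7", "8", "9", "T", "J", "Q", "K", "A"]
  let hand := PySem.Str.join " " splited_hand
  let present := ([("?R", ["D", "H"]), ("?B", ["C", "S"])] : List (String × List String)).filter
      (fun p => PySem.Str.isIn p.1 hand)
  pvExpand ranks hand present

-- ===== PRECONDITION & SPEC =====
def Spec_replace_jokers (splited_hand : List String) (out : List (List String)) : Prop := out = replace_jokers_alt splited_hand
instance (splited_hand : List String) (out : List (List String)) : Decidable (Spec_replace_jokers splited_hand out) := by unfold Spec_replace_jokers; infer_instance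

-- ===== CLAIM (what is proved, stated in full; the proofs are below) =====
def Claim_equal_replace_jokers : Prop := ∀ (splited_hand : List String), Dom_replace_jokers splited_hand → Spec_replace_jokers splited_hand (replace_jokers splited_hand)

-- ===== LEMMAS AND PROOFS =====
theorem replace_jokers_core_eq (hand : String) :
    (let suits_red : List String := ["D", "H"]
     let suits_black : List String := ["C", "S"]
     let ranks : List String := ["2", "3", "4", "5", "6", "7", "8", "9", "T", "J", "Q", "K", "A"]
     if PySem.Str.isIn "?R" hand && PySem.Str.isIn "?B" hand then
       let result := ((suits_red.flatMap (fun s => ranks.map (fun r => (s, r)))).map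
           (fun j => PySem.Str.join "" [j.2, j.1])).map
         (fun i => PySem.Str.replace hand "?R" i)
       result.flatMap (fun k =>
         ((suits_black.flatMap (fun s => ranks.map (fun r => (s, r)))).map
             (fun j => PySem.Str.join "" [j.2, j.1])).map
           (fun i => PySem.Str.split₀ (PySem.Str.replace k "?B" i)))
     else if PySem.Str.isIn "?R" hand then
       ((suits_red.flatMap (fun s => ranks.map (fun r => (s, r)))).map
           (fun j => PySem.Str.join "" [j.2, j.1])).map
         (fun i => PySem.Str.split₀ (PySem.Str.replace hand "?R" i))
     else if PySem.Str.isIn "?B" hand then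
       ((suits_black.flatMap (fun s => ranks.map (fun r => (s, r)))).map
           (fun j => PySem.Str.join "" [j.2, j.1])).map
         (fun i => PySem.Str.split₀ (PySem.Str.replace hand "?B" i))
     else
       [PySem.Str.split₀ hand]) =
    (let ranks : List String := ["2", "3", "4", "5", "6", "7", "8", "9", "T", "J", "Q", "K", "A"]
     let present := ([("?R", ["D", "H"]), ("?B", ["C", "S"])] : List (String × List String)).filter
         (fun p => PySem.Str.isIn p.1 hand)
     pvExpand ranks hand present) := by
  cases hR : PySem.Str.isIn "?R" hand <;> cases hB : PySem.Str.isIn "?B" hand <;>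
    simp only [PySem.Str.isIn, String.toList] at hR hB <;>
    set_option maxRecDepth 40000 in
    simp [pvExpand, PySem.Str.isIn, String.toList, hR, hB, List.filter]

theorem replace_jokers_spec : Claim_equal_replace_jokers := by
  intro splited_hand _
  unfold Spec_replace_jokers replace_jokers replace_jokers_alt
  exact replace_jokers_core_eq (PySem.Str.join " " splited_hand)
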